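-- pv_equiv track=rewrite | github.com/michalbarer/OSFingerprint | response_tests/ip_id_test/base_ip_id_test.py | classify_ipid_sequence
-- ===== SOURCE A (Python) =====
-- from typing import List, Optional
--
-- def classify_ipid_sequence(ip_ids: List[int]) -> Optional[str]:
--     """
--     Classifies the IP ID sequence based on the differences between consecutive IDs.
--     """
--     if not ip_ids:
--         return None
--
--     if all(id == 0 for id in ip_ids):
--         return 'Z'
--
--     diffs = []
--     for i in range(1, len(ip_ids)):
--         diff = (ip_ids[i] - ip_ids[i - 1]) % 65536  # 16-bit wraparound
--         diffs.append(diff)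
--
--     if any(diff >= 20000 for diff in diffs):
--         return 'RD'
--
--     if all(id == ip_ids[0] for id in ip_ids):
--         return hex(ip_ids[0])
--
--     # Check for RI: any diff >1000 and not divisible by 256
--     if any(diff > 1000 and diff % 256 != 0 for diff in diffs):
--         return 'RI'
--
--     # Check for BI: all diffs divisible by 256 and <=5120
--     if all(diff % 256 == 0 and diff <= 5120 for diff in diffs):
--         return 'BI'
--
--     # Check for I: all diffs <10
--     if all(diff < 10 for diff in diffs):
--         return 'I'
--
--     return None
-- ===== SOURCE B (Python) =====
-- from typing import List, Optional
--
-- def classify_ipid_sequence(ip_ids: List[int]) -> Optional[str]: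
--     """Single-pass classification: one loop accumulates all flags, then one priority ladder."""
--     if not ip_ids:
--         return None
--     first = ip_ids[0]
--     all_zero = first == 0
--     all_same = True
--     any_rd = False
--     any_ri = False
--     all_bi = True
--     all_i = True
--     prev = first
--     for cur in ip_ids[1:]:
--         d = (cur - prev) % 65536
--         all_zero = all_zero and cur == 0
--         all_same = all_same and cur == first
--         any_rd = any_rd or d >= 20000
--         any_ri = any_ri or (d > 1000 and d % 256 != 0)
--         all_bi = all_bi and (d % 256 == 0 and d <= 5120)
--         all_i = all_i and d < 10
--         prev = cur
--     if all_zero: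
--         return 'Z'
--     if any_rd:
--         return 'RD'
--     if all_same:
--         return hex(first)
--     if any_ri:
--         return 'RI'
--     if all_bi:
--         return 'BI'
--     if all_i:
--         return 'I'
--     return None
-- ===== Notes on version B (the rewrite author's own statement) =====
-- stated objective: alternative
-- what changed: Replaces the intermediate diffs list and five separate all/any scans with a single loop that accumulates six boolean flags, followed by the same priority ladder.
import Mathlib
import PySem

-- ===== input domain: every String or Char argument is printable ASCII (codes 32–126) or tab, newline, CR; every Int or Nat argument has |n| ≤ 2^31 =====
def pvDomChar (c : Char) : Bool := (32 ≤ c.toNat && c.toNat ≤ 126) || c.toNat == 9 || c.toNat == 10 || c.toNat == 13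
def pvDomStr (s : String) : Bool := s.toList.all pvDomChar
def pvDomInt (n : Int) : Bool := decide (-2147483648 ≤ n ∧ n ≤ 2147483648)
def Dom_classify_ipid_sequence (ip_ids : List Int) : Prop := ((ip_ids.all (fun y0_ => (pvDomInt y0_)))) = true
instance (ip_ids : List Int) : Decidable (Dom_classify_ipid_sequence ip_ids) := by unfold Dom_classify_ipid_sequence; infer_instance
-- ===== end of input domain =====

-- B replaces A's intermediate diffs list and five separate all/any scans with one
-- flag-accumulating pass followed by the same priority ladder (alternative decomposition).


-- shared port of Python's builtin hex(n): '0x…' lowercase, '-0x…' for negatives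
def pyHex (n : Int) : String :=
  (if n < 0 then "-0x" else "0x") ++ String.mk (Nat.toDigits 16 n.natAbs)

-- ===== PORT A =====
def classify_ipid_sequence (ip_ids : List Int) : Option String :=
  if ip_ids = [] then none
  else if ip_ids.all (fun id => id == 0) then some "Z"
  else
    let diffs := (PySem.List.pyRange 1 ip_ids.length 1).foldl
      (fun acc i => acc ++
        [PySem.Int.mod (PySem.List.pyGetD ip_ids i 0 - PySem.List.pyGetD ip_ids (i - 1) 0) 65536]) []
    if diffs.any (fun d => decide (d ≥ 20000)) then some "RD"
    else if ip_ids.all (fun id => id == PySem.List.pyGetD ip_ids 0 0) then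
      some (pyHex (PySem.List.pyGetD ip_ids 0 0))
    else if diffs.any (fun d => decide (d > 1000) && (PySem.Int.mod d 256 != 0)) then some "RI"
    else if diffs.all (fun d => (PySem.Int.mod d 256 == 0) && decide (d ≤ 5120)) then some "BI"
    else if diffs.all (fun d => decide (d < 10)) then some "I"
    else none

-- ===== PORT B =====
-- state: (prev, all_zero, all_same, any_rd, any_ri, all_bi, all_i)
def bStep (first : Int) (st : Int × Bool × Bool × Bool × Bool × Bool × Bool) (cur : Int) :
    Int × Bool × Bool × Bool × Bool × Bool × Bool :=
  let d := PySem.Int.mod (cur - st.1) 65536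
  (cur,
   st.2.1 && (cur == 0),
   st.2.2.1 && (cur == first),
   st.2.2.2.1 || decide (d ≥ 20000),
   st.2.2.2.2.1 || (decide (d > 1000) && (PySem.Int.mod d 256 != 0)),
   st.2.2.2.2.2.1 && ((PySem.Int.mod d 256 == 0) && decide (d ≤ 5120)),
   st.2.2.2.2.2.2 && decide (d < 10))

def classify_ipid_sequence_alt (ip_ids : List Int) : Option String :=
  match ip_ids with
  | [] => none
  | first :: rest =>
    let st := rest.foldl (bStep first) (first, first == 0, true, false, false, true, true)
    if st.2.1 then some "Z"
    else if st.2.2.2.1 then some "RD"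
    else if st.2.2.1 then some (pyHex first)
    else if st.2.2.2.2.1 then some "RI"
    else if st.2.2.2.2.2.1 then some "BI"
    else if st.2.2.2.2.2.2 then some "I"
    else none

-- ===== PRECONDITION & SPEC =====
def Spec_classify_ipid_sequence (ip_ids : List Int) (out : Option String) : Prop := out = classify_ipid_sequence_alt ip_ids
instance (ip_ids : List Int) (out : Option String) : Decidable (Spec_classify_ipid_sequence ip_ids out) := by unfold Spec_classify_ipid_sequence; infer_instance

-- ===== CLAIM (what is proved, stated in full; the proofs are below) =====
def Claim_equal_classify_ipid_sequence : Prop := ∀ (ip_ids : List Int), Dom_classify_ipid_sequence ip_ids → Spec_classify_ipid_sequence ip_ids (classify_ipid_sequence ip_ids)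

-- ===== LEMMAS AND PROOFS =====

-- the list of consecutive 16-bit diffs, as structural recursion
def diffL (prev : Int) : List Int → List Int
  | [] => []
  | c :: r => PySem.Int.mod (c - prev) 65536 :: diffL c r

-- B's fold computes exactly the all/any scans over diffL
theorem bFold (first : Int) (rest : List Int) (prev : Int) (z s rd ri bi i : Bool) :
    rest.foldl (bStep first) (prev, z, s, rd, ri, bi, i) =
      (rest.getLastD prev,
       z && rest.all (fun c => c == 0),
       s && rest.all (fun c => c == first),
       rd || (diffL prev rest).any (fun d => decide (d ≥ 20000)),
       ri || (diffL prev rest).any (fun d => decide (d > 1000) && (PySem.Int.mod d 256 != 0)),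
       bi && (diffL prev rest).all (fun d => (PySem.Int.mod d 256 == 0) && decide (d ≤ 5120)),
       i && (diffL prev rest).all (fun d => decide (d < 10))) := by
  induction rest generalizing prev z s rd ri bi i with
  | nil => simp [diffL]
  | cons c r ih =>
    simp only [List.foldl_cons, bStep, diffL, List.any_cons, List.all_cons, ih,
      List.getLastD_cons, Bool.and_assoc, Bool.or_assoc]

-- A's diffs list equals diffL
theorem diffAux (x : Int) (xs : List Int) :
    (List.range xs.length).map (fun k =>
      PySem.Int.mod (xs.getD k 0 - (x :: xs).getD k 0) 65536) = diffL x xs := by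
  induction xs generalizing x with
  | nil => simp [diffL]
  | cons c r ih =>
    simp only [List.length_cons, List.range_succ_eq_map, List.map_cons, List.map_map,
      List.getD_cons_zero, diffL, List.cons.injEq, Function.comp_def, List.getD_cons_succ]
    exact ⟨trivial, ih c⟩

theorem diffsA_eq (x : Int) (xs : List Int) :
    ((PySem.List.pyRange 1 ((x :: xs).length : Int) 1).foldl
      (fun acc i => acc ++
        [PySem.Int.mod (PySem.List.pyGetD (x :: xs) i 0 - PySem.List.pyGetD (x :: xs) (i - 1) 0) 65536]) [])
    = diffL x xs := by
  rw [PySem.List.foldl_append_singleton_eq_map, PySem.List.pyRange_one]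
  have hlen : ((((x :: xs).length : Int)) - 1).toNat = xs.length := by simp
  rw [hlen, List.map_map, List.nil_append]
  rw [show ((fun i => PySem.Int.mod (PySem.List.pyGetD (x :: xs) i 0 - PySem.List.pyGetD (x :: xs) (i - 1) 0) 65536) ∘ fun k : Nat => (1 : Int) + ↑k)
      = fun k : Nat => PySem.Int.mod (xs.getD k 0 - (x :: xs).getD k 0) 65536 from ?_]
  · exact diffAux x xs
  · funext k
    have e1 : (1 : Int) + (k : Int) = ((k + 1 : Nat) : Int) := by push_cast; ring
    have e2 : ((k + 1 : Nat) : Int) - 1 = ((k : Nat) : Int) := by push_cast; ring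
    simp only [Function.comp_def, e1, e2, PySem.List.pyGetD_natCast, List.getD_cons_succ]

-- ===== VERDICT (by name: the statement is the Claim_ definition above) =====
theorem classify_ipid_sequence_spec : Claim_equal_classify_ipid_sequence := by
  intro l _
  unfold Spec_classify_ipid_sequence
  cases l with
  | nil => rfl
  | cons x xs =>
    simp only [classify_ipid_sequence, classify_ipid_sequence_alt, bFold, diffsA_eq,
      PySem.List.pyGetD_zero_cons, List.all_cons, beq_self_eq_true, Bool.true_and,
      Bool.false_or, reduceCtorEq, if_false]
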